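-- pv_equiv track=rewrite | github.com/amcconve/AdventOfCode | 2020Dec09.py | create_possible_sums
-- ===== SOURCE A (Python) =====
-- import itertools
--
-- def create_possible_sums(data: tuple):
-- 	possible_sums = {}
-- 	for a, b in itertools.combinations(data, 2):
-- 		if a == b:  # Summands must be different
-- 			continue
--
-- 		entry = a + b
-- 		possible_sums[entry] = possible_sums.get(entry, 0) + 1
--
-- 	return possible_sums
-- ===== SOURCE B (Python) =====
-- def create_possible_sums(data: tuple):
-- 	# One pass with a frequency table of the remaining (still unpaired) values:
-- 	# for each element x, add count(v) to sums[x+v] for every distinct later value v != x,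
-- 	# instead of walking every individual pair.
-- 	remaining = {}
-- 	for y in data:
-- 		remaining[y] = remaining.get(y, 0) + 1
--
-- 	sums = {}
-- 	for x in data:
-- 		c = remaining[x] - 1  # this occurrence of x leaves the pool
-- 		if c:
-- 			remaining[x] = c
-- 		else:
-- 			del remaining[x]
-- 		for v, cnt in remaining.items():
-- 			if v != x:
-- 				s = x + v
-- 				sums[s] = sums.get(s, 0) + cnt
-- 	return sums
-- ===== Notes on version B (the rewrite author's own statement) =====
-- stated objective: alternative
-- what changed: Replaces the scan over all itertools.combinations element pairs by a single pass that maintains a frequency table of the values still ahead and, per element, adds count-weighted contributions for each distinct remaining value, so equal-valued pairs are handled grouped rather than one pair at a time.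
import Mathlib
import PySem

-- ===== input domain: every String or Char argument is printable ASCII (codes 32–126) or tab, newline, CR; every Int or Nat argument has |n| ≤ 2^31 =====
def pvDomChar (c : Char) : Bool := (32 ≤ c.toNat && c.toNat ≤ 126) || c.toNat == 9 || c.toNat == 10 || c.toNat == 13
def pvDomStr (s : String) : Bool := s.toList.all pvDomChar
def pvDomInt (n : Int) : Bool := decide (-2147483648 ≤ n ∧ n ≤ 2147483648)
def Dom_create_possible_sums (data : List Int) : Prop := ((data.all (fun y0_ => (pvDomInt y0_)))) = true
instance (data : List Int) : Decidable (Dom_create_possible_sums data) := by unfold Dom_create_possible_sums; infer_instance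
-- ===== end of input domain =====

-- B replaces A's walk over all element pairs by one pass that keeps a frequency table of the
-- values still ahead and adds count-weighted contributions per distinct remaining value
-- (alternative decomposition; same return value, proved below).

-- ===== PORT A =====
-- itertools.combinations(data, 2), in iteration order
def pvCombos : List Int → List (Int × Int)
  | [] => []
  | x :: rest => rest.map (fun y => (x, y)) ++ pvCombos rest

-- loop body of A: skip equal summands, else possible_sums[a+b] = possible_sums.get(a+b, 0) + 1
def pvStepA (d : PySem.Dict Int Int) (p : Int × Int) : PySem.Dict Int Int :=
  if p.1 == p.2 then d else d.insert (p.1 + p.2) (d.getD (p.1 + p.2) 0 + 1)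

def create_possible_sums (data : List Int) : List (Int × Int) :=
  ((pvCombos data).foldl pvStepA PySem.Dict.empty).items

-- ===== PORT B =====
-- loop body of B: drop this occurrence of x from the pool, then add cnt to sums[x+v]
-- for every distinct remaining value v ≠ x.  (remaining[x] always hits an existing key,
-- so Dict.getD is exact for Python's remaining[x].)
def pvStepB (st : PySem.Dict Int Int × PySem.Dict Int Int) (x : Int) :
    PySem.Dict Int Int × PySem.Dict Int Int :=
  let c := st.1.getD x 0 - 1
  let rem' := if c ≠ 0 then st.1.insert x c else st.1.erase x
  let sums' := rem'.items.foldl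
    (fun s p => if p.1 ≠ x then s.insert (x + p.1) (s.getD (x + p.1) 0 + p.2) else s) st.2
  (rem', sums')

def create_possible_sums_alt (data : List Int) : List (Int × Int) :=
  let remaining := data.foldl (fun d y => d.insert y (d.getD y 0 + 1)) PySem.Dict.empty
  (data.foldl pvStepB (remaining, PySem.Dict.empty)).2.items

-- ===== PRECONDITION & SPEC =====
def Spec_create_possible_sums (data : List Int) (out : List (Int × Int)) : Prop := out = create_possible_sums_alt data
instance (data : List Int) (out : List (Int × Int)) : Decidable (Spec_create_possible_sums data out) := by unfold Spec_create_possible_sums; infer_instance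

-- ===== CLAIM (what is proved, stated in full; the proofs are below) =====
def Claim_equal_create_possible_sums : Prop := ∀ (data : List Int), Dom_create_possible_sums data → Spec_create_possible_sums data (create_possible_sums data)

-- ===== LEMMAS AND PROOFS =====

-- generic: a fold whose body skips under a guard is a fold over the filtered list
theorem pvFoldlSkipIf {α β : Type} (p : α → Bool) (g : β → α → β) :
    ∀ (l : List α) (s : β),
      l.foldl (fun s a => if p a then s else g s a) s = (l.filter (fun a => !p a)).foldl g s := by
  intro l
  induction l with
  | nil => intro s; rfl
  | cons a tl ih =>
    intro s
    by_cases h : p a = true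
    · simp [List.filter_cons, h, ih]
    · simp [List.filter_cons, h, ih]

theorem pvFoldlDoIf {α β : Type} (p : α → Bool) (g : β → α → β) :
    ∀ (l : List α) (s : β),
      l.foldl (fun s a => if p a then g s a else s) s = (l.filter p).foldl g s := by
  intro l
  induction l with
  | nil => intro s; rfl
  | cons a tl ih =>
    intro s
    by_cases h : p a = true
    · simp [List.filter_cons, h, ih]
    · simp [List.filter_cons, h, ih]

-- apply a list of (key, amount) increments to a dict
def pvApplyIncs (s : PySem.Dict Int Int) (ps : List (Int × Int)) : PySem.Dict Int Int :=
  ps.foldl (fun s p => s.insert p.1 (s.getD p.1 0 + p.2)) s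

theorem pvKeysApplyIncs (s : PySem.Dict Int Int) (ps : List (Int × Int)) :
    (pvApplyIncs s ps).keys = PySem.Set.update s.keys (ps.map (fun p => p.1)) :=
  PySem.Dict.keys_foldl_insert_key ps (fun p => p.1) (fun d p => d.getD p.1 0 + p.2) s

theorem pvNodupApplyIncs (s : PySem.Dict Int Int) (ps : List (Int × Int))
    (h : s.keys.Nodup) : (pvApplyIncs s ps).keys.Nodup :=
  PySem.Dict.nodup_keys_foldl_insert_key ps (fun p => p.1) (fun d p => d.getD p.1 0 + p.2) s h

theorem pvGetDApplyIncs (ps : List (Int × Int)) :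
    ∀ (s : PySem.Dict Int Int) (k : Int),
      (pvApplyIncs s ps).getD k 0
        = s.getD k 0 + ((ps.filter (fun p => p.1 == k)).map (fun p => p.2)).sum := by
  induction ps with
  | nil => intro s k; simp [pvApplyIncs]
  | cons p tl ih =>
    intro s k
    simp only [pvApplyIncs, List.foldl_cons] at *
    rw [ih]
    by_cases h : p.1 = k
    · simp [List.filter_cons, h, PySem.Dict.getD_insert]
      omega
    · simp [List.filter_cons, h, PySem.Dict.getD_insert, Ne.symm h]
theorem pvDictExt (d d' : PySem.Dict Int Int)
    (hd : d.keys.Nodup) (hd' : d'.keys.Nodup)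
    (hk : d.keys = d'.keys) (hv : ∀ k, d.getD k 0 = d'.getD k 0) : d = d' := by
  apply PySem.Dict.ext
  rw [PySem.Dict.items_eq_map_keys d hd 0, PySem.Dict.items_eq_map_keys d' hd' 0, hk]
  apply List.map_congr_left
  intro k _
  rw [hv k]
-- erase facts (PySem.Dict.erase d k = ⟨d.items.filter (fun p => !(p.1 == k))⟩)
theorem pvKeysErase (d : PySem.Dict Int Int) (x : Int) :
    (d.erase x).keys = d.keys.filter (fun v => !(v == x)) := by
  show (d.items.filter (fun p => !(p.1 == x))).map (fun p => p.1)
      = (d.items.map (fun p => p.1)).filter (fun v => !(v == x))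
  rw [List.filter_map]
  rfl
theorem pvGetDEraseSelf (d : PySem.Dict Int Int) (x : Int) :
    (d.erase x).getD x 0 = 0 := by
  show ((Option.map (fun p => p.2) (List.find? (fun p => p.1 == x) (d.items.filter (fun p => !(p.1 == x))))).getD 0) = 0
  rw [List.find?_eq_none.2]
  · rfl
  · intro p hp
    have := List.of_mem_filter hp
    simpa using this
theorem pvGetDEraseOfNe (d : PySem.Dict Int Int) (x v : Int) (h : v ≠ x) :
    (d.erase x).getD v 0 = d.getD v 0 := by
  show ((Option.map (fun p => p.2) (List.find? (fun p => p.1 == v) (d.items.filter (fun p => !(p.1 == x))))).getD 0)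
      = ((Option.map (fun p => p.2) (List.find? (fun p => p.1 == v) d.items)).getD 0)
  congr 2
  induction d.items with
  | nil => rfl
  | cons q tl ih =>
    by_cases hq : q.1 = x
    · have hqv : (q.1 == v) = false := by simp [hq, Ne.symm h]
      rw [List.filter_cons]
      simp only [hq, beq_self_eq_true, Bool.not_true, Bool.false_eq_true, if_false]
      rw [List.find?_cons, hqv]
      exact ih
    · have hqx : (!(q.1 == x)) = true := by simp [hq]
      rw [List.filter_cons, if_pos hqx, List.find?_cons, List.find?_cons]
      by_cases hv : q.1 = v
      · simp [hv]
      · have : (q.1 == v) = false := by simp [hv]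
        rw [this]
        exact ih
theorem pvFilterAdd (p : Int → Bool) (s : PySem.Set Int) (x : Int) :
    (PySem.Set.add s x).filter p = if p x then PySem.Set.add (List.filter p s) x else List.filter p s := by
  by_cases hm : x ∈ s
  · rw [PySem.Set.add_of_mem hm]
    by_cases hp : p x = true
    · rw [if_pos hp, PySem.Set.add_of_mem (List.mem_filter.2 ⟨hm, hp⟩)]
    · simp [hp]
  · rw [PySem.Set.add_of_not_mem hm]
    by_cases hp : p x = true
    · rw [if_pos hp, List.filter_append,
        PySem.Set.add_of_not_mem (fun hc => hm (List.mem_of_mem_filter hc))]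
      simp [hp]
    · simp [hp, List.filter_append]

theorem pvFoldlAddFilter (p : Int → Bool) (l : List Int) :
    ∀ (s : PySem.Set Int),
      (l.foldl PySem.Set.add s).filter p = (l.filter p).foldl PySem.Set.add (s.filter p) := by
  induction l with
  | nil => intro s; rfl
  | cons a tl ih =>
    intro s
    rw [List.foldl_cons, ih, List.filter_cons, pvFilterAdd]
    by_cases hp : p a = true
    · simp [hp]
    · simp [hp]

theorem pvMapAdd (x : Int) (s : PySem.Set Int) (y : Int) :
    (PySem.Set.add s y).map (fun v => x + v) = PySem.Set.add (s.map (fun v => x + v)) (x + y) := by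
  by_cases hm : y ∈ s
  · rw [PySem.Set.add_of_mem hm, PySem.Set.add_of_mem (List.mem_map_of_mem hm)]
  · rw [PySem.Set.add_of_not_mem hm, PySem.Set.add_of_not_mem]
    · simp
    · intro hc
      obtain ⟨w, hw, he⟩ := List.mem_map.1 hc
      have : w = y := by omega
      exact hm (this ▸ hw)

theorem pvFoldlAddMap (x : Int) (l : List Int) :
    ∀ (s : PySem.Set Int),
      (l.foldl PySem.Set.add s).map (fun v => x + v)
        = (l.map (fun v => x + v)).foldl PySem.Set.add (s.map (fun v => x + v)) := by
  induction l with
  | nil => intro s; rfl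
  | cons a tl ih =>
    intro s
    rw [List.foldl_cons, ih, List.map_cons, List.foldl_cons, pvMapAdd]

-- Set.ofList commutes with filter and with an injective map
theorem pvOfListFilter (p : Int → Bool) (l : List Int) :
    PySem.Set.ofList (l.filter p) = (PySem.Set.ofList l).filter p := by
  show _ = (l.foldl PySem.Set.add PySem.Set.empty).filter p
  rw [pvFoldlAddFilter]
  rfl
theorem pvOfListMapAdd (x : Int) (l : List Int) :
    PySem.Set.ofList (l.map (fun y => x + y)) = (PySem.Set.ofList l).map (fun y => x + y) := by
  show (l.map (fun y => x + y)).foldl PySem.Set.add PySem.Set.empty = _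
  rw [show (PySem.Set.empty : PySem.Set Int) = (PySem.Set.empty : PySem.Set Int).map (fun v => x + v) from rfl,
    ← pvFoldlAddMap]
  rfl
-- value sums of the two increment lists
theorem pvSumOnes (x k : Int) (L : List Int) :
    (((L.map (fun y => ((x + y : Int), (1 : Int)))).filter (fun p => p.1 == k)).map
        (fun p => p.2)).sum = (L.count (k - x) : Int) := by
  induction L with
  | nil => simp
  | cons y tl ih =>
    by_cases h : x + y = k
    · have : y = k - x := by omega
      simp [List.filter_cons, h, List.count_cons, this, ih]
      omega
    · have hy : y ≠ k - x := by omega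
      simp [List.filter_cons, h, List.count_cons, hy, ih]
theorem pvSumNodup (x k : Int) (g : Int → Int) (σ : List Int) (hσ : σ.Nodup) :
    (((σ.map (fun v => ((x + v : Int), g v))).filter (fun p => p.1 == k)).map
        (fun p => p.2)).sum = if (k - x) ∈ σ then g (k - x) else 0 := by
  induction σ with
  | nil => simp
  | cons v tl ih =>
    have hnd := hσ
    rw [List.nodup_cons] at hnd
    by_cases h : x + v = k
    · have hv : v = k - x := by omega
      have hnot : (k - x) ∉ tl := hv ▸ hnd.1
      have : (((tl.map (fun v => ((x + v : Int), g v))).filter (fun p => p.1 == k)).map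
          (fun p => p.2)).sum = 0 := by rw [ih hnd.2, if_neg hnot]
      simp [List.filter_cons, h, hv, this]
    · have hv : v ≠ k - x := by omega
      simp [List.filter_cons, h, ih hnd.2, hv, Ne.symm hv]
-- THE ORDER LEMMA: per head x, the grouped (distinct-value, count-weighted) increments
-- produce the same dict, including key order, as the per-element increments — keys whose
-- value already occurred earlier cannot create a new sum key.
theorem pvStepSums (x : Int) (t pre : List Int) (sums rem' : PySem.Dict Int Int)
    (hrk : rem'.keys = (PySem.Set.ofList ((pre ++ [x]) ++ t)).filter (fun v => decide (v ∈ t)))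
    (hrv : ∀ v, rem'.getD v 0 = (t.count v : Int))
    (hsn : sums.keys.Nodup)
    (hcov : ∀ v, v ∈ pre → v ≠ x → (x + v) ∈ sums.keys) :
    pvApplyIncs sums ((rem'.items.filter (fun p => !(p.1 == x))).map (fun p => (x + p.1, p.2)))
      = pvApplyIncs sums ((t.filter (fun y => !(x == y))).map (fun y => (x + y, 1))) := by
  have hnod : rem'.keys.Nodup := by
    rw [hrk]; exact (PySem.Set.nodup_ofList _).filter _
  have hLB : (rem'.items.filter (fun p => !(p.1 == x))).map (fun p => ((x + p.1 : Int), p.2))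
      = (rem'.keys.filter (fun v => !(v == x))).map (fun v => (x + v, rem'.getD v 0)) := by
    rw [PySem.Dict.items_eq_map_keys rem' hnod 0, List.filter_map, List.map_map]
    rfl
  rw [hLB]
  have hσn : (rem'.keys.filter (fun v => !(v == x))).Nodup := hnod.filter _
  -- the two filtered key lists coincide: stale values (already seen, hence covered) drop out
  have hkeylist : ∀ (c : Int → Bool), (∀ v, v ∈ pre → v ≠ x → c v = false) →
      (rem'.keys.filter (fun v => !(v == x))).filter c
        = ((PySem.Set.ofList t).filter (fun y => !(x == y))).filter c := by
    intro c hc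
    rw [List.filter_filter, List.filter_filter, hrk, List.filter_filter]
    rw [PySem.Set.ofList_append, PySem.Set.update_eq_append_filter, List.filter_append]
    have h1 : (PySem.Set.ofList (pre ++ [x])).filter
        (fun a => c a && !(a == x) && decide (a ∈ t)) = [] := by
      rw [List.filter_eq_nil_iff]
      intro v hv
      have hv' : v ∈ pre ++ [x] := (PySem.Set.mem_ofList _ _).1 hv
      rcases List.mem_append.1 hv' with hp | hx
      · intro hcond
        simp only [Bool.and_eq_true, ne_eq, decide_eq_true_eq,
          Bool.not_eq_true', beq_eq_false_iff_ne] at hcond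
        obtain ⟨⟨hcv, hvx⟩, -⟩ := hcond
        rw [hc v hp hvx] at hcv
        exact absurd hcv (by simp)
      · simp at hx
        subst hx
        simp
    rw [h1, List.nil_append, List.filter_filter]
    apply List.filter_congr
    intro v hv
    have hvt : v ∈ t := (PySem.Set.mem_ofList _ _).1 hv
    by_cases hvx : v = x
    · simp [hvx]
    · by_cases hcv : c v = true
      · have hvpre : v ∉ pre := fun hp => by simp [hc v hp hvx] at hcv
        have : (PySem.Set.ofList (pre ++ [x])).contains v = false := by
          rw [PySem.Set.contains_eq_decide]
          simp only [decide_eq_false_iff_not]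
          intro hm
          rcases List.mem_append.1 ((PySem.Set.mem_ofList _ _).1 hm) with hp | hx'
          · exact hvpre hp
          · simp at hx'; exact hvx hx'
        simp [this, hvt, hvx, hcv, Ne.symm hvx, hvpre]
      · simp only [Bool.not_eq_true] at hcv
        simp [hcv, hvx, Ne.symm hvx, hvt]
  apply pvDictExt _ _ (pvNodupApplyIncs _ _ hsn) (pvNodupApplyIncs _ _ hsn)
  · -- equal key lists, including order
    rw [pvKeysApplyIncs, pvKeysApplyIncs, List.map_map, List.map_map]
    show PySem.Set.update sums.keys ((rem'.keys.filter (fun v => !(v == x))).map (fun v => x + v))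
        = PySem.Set.update sums.keys ((t.filter (fun y => !(x == y))).map (fun y => x + y))
    rw [PySem.Set.update_eq_append_filter, PySem.Set.update_eq_append_filter]
    congr 1
    have hmn : ((rem'.keys.filter (fun v => !(v == x))).map (fun v => x + v)).Nodup :=
      hσn.map (fun a b h => by omega)
    rw [PySem.Set.ofList_eq_self_of_nodup _ hmn, pvOfListMapAdd, pvOfListFilter,
      List.filter_map, List.filter_map]
    apply congrArg
    exact hkeylist _ (fun v hp hvx => by
      have := hcov v hp hvx
      simp [Function.comp, PySem.Set.contains_eq_decide, this])
  · -- equal values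
    intro k
    rw [pvGetDApplyIncs, pvGetDApplyIncs]
    congr 1
    rw [pvSumNodup x k _ _ hσn, pvSumOnes]
    by_cases h1 : (k - x) = x
    · rw [if_neg (fun hm => by simp [h1] at hm)]
      have : (k - x) ∉ t.filter (fun y => !(x == y)) := fun hm => by
        have := List.of_mem_filter hm
        simp [h1] at this
      rw [← List.count_eq_zero] at this
      simp [this]
    · by_cases h2 : (k - x) ∈ t
      · have hm : (k - x) ∈ rem'.keys.filter (fun v => !(v == x)) := by
          rw [hrk, List.filter_filter]
          refine List.mem_filter.2 ⟨(PySem.Set.mem_ofList _ _).2 ?_, by simp [h2, h1]⟩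
          simp [h2]
        rw [if_pos hm, hrv, List.count_filter (by simp [Ne.symm h1])]
      · rw [if_neg (fun hm => h2 (by
          rw [hrk, List.filter_filter] at hm
          have h3 := (List.mem_filter.1 hm).2
          simp only [Bool.and_eq_true, Bool.not_eq_true', beq_eq_false_iff_ne,
            decide_eq_true_eq] at h3
          exact h3.2))]
        have : (k - x) ∉ t.filter (fun y => !(x == y)) := fun hm => h2 (List.mem_of_mem_filter hm)
        rw [← List.count_eq_zero] at this
        simp [this]

-- converting the inner loop of B to an increment application
theorem pvInnerEq (x : Int) (R : PySem.Dict Int Int) (sums : PySem.Dict Int Int) :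
    R.items.foldl
        (fun s p => if p.1 ≠ x then s.insert (x + p.1) (s.getD (x + p.1) 0 + p.2) else s) sums
      = pvApplyIncs sums ((R.items.filter (fun p => !(p.1 == x))).map (fun p => (x + p.1, p.2))) := by
  have hfun : (fun (s : PySem.Dict Int Int) (p : Int × Int) =>
        if p.1 ≠ x then s.insert (x + p.1) (s.getD (x + p.1) 0 + p.2) else s)
      = (fun s p => if (!(p.1 == x)) = true then s.insert (x + p.1) (s.getD (x + p.1) 0 + p.2) else s) := by
    funext s p
    by_cases h : p.1 = x <;> simp [h]
  rw [hfun, pvFoldlDoIf (fun p => !(p.1 == x))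
    (fun s p => s.insert (x + p.1) (s.getD (x + p.1) 0 + p.2)) R.items sums]
  show _ = ((R.items.filter (fun p => !(p.1 == x))).map (fun p => ((x + p.1 : Int), p.2))).foldl
      (fun s p => s.insert p.1 (s.getD p.1 0 + p.2)) sums
  rw [List.foldl_map]

-- main loop invariant: remaining is the frequency table of the suffix (keys ordered by
-- first occurrence in the whole list), sums covers all earlier cross pairs
theorem pvMainLoop :
    ∀ (l pre : List Int) (rem sums : PySem.Dict Int Int),
      rem.keys = (PySem.Set.ofList (pre ++ l)).filter (fun v => decide (v ∈ l)) →
      (∀ v, rem.getD v 0 = (l.count v : Int)) →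
      sums.keys.Nodup →
      (∀ v w, v ∈ pre → w ∈ l → v ≠ w → (v + w) ∈ sums.keys) →
      (l.foldl pvStepB (rem, sums)).2 = (pvCombos l).foldl pvStepA sums := by
  intro l
  induction l with
  | nil => intro pre rem sums _ _ _ _; rfl
  | cons x t ih =>
    intro pre rem sums hrk hrv hsn hcov
    -- the A side groups as: head pairs first, then the pairs of the tail
    have hA : (pvCombos (x :: t)).foldl pvStepA sums
        = (pvCombos t).foldl pvStepA
            (pvApplyIncs sums ((t.filter (fun y => !(x == y))).map (fun y => (x + y, 1)))) := by
      show ((t.map (fun y => (x, y)) ++ pvCombos t).foldl pvStepA sums) = _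
      rw [List.foldl_append]
      congr 1
      show (t.map (fun y => (x, y))).foldl
          (fun d p => if p.1 == p.2 then d
            else d.insert (p.1 + p.2) (d.getD (p.1 + p.2) 0 + 1)) sums = _
      rw [pvFoldlSkipIf (fun (p : Int × Int) => p.1 == p.2)
        (fun (d : PySem.Dict Int Int) (p : Int × Int) =>
          d.insert (p.1 + p.2) (d.getD (p.1 + p.2) 0 + 1)) _ sums,
        List.filter_map, List.foldl_map]
      show _ = ((t.filter (fun y => !(x == y))).map (fun y => ((x + y : Int), (1 : Int)))).foldl
          (fun s p => s.insert p.1 (s.getD p.1 0 + p.2)) sums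
      rw [List.foldl_map]
      rfl
    have hcx : rem.getD x 0 - 1 = (t.count x : Int) := by
      rw [hrv x, List.count_cons_self]
      push_cast
      omega
    have hmemx : x ∈ rem.keys := by
      rw [hrk]
      refine List.mem_filter.2 ⟨(PySem.Set.mem_ofList _ _).2 ?_, by simp⟩
      simp
    have hcov' : ∀ v, v ∈ pre → v ≠ x → (x + v) ∈ sums.keys := by
      intro v hp hvx
      have := hcov v x hp (List.mem_cons_self) hvx
      rwa [Int.add_comm] at this
    -- one step of B
    have hpre_eq : pre ++ x :: t = (pre ++ [x]) ++ t := by simp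
    by_cases hx : x ∈ t
    · have hcne : rem.getD x 0 - 1 ≠ 0 := by
        rw [hcx]
        have : t.count x ≠ 0 := by
          intro h0
          exact (List.count_eq_zero.1 h0) hx
        omega
      have hstep : (x :: t).foldl pvStepB (rem, sums)
          = t.foldl pvStepB (rem.insert x (rem.getD x 0 - 1),
              (rem.insert x (rem.getD x 0 - 1)).items.foldl
                (fun s p => if p.1 ≠ x then s.insert (x + p.1) (s.getD (x + p.1) 0 + p.2) else s)
                sums) := by
        rw [List.foldl_cons]
        simp only [pvStepB, if_pos hcne]
      set R := rem.insert x (rem.getD x 0 - 1) with hRdef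
      have hRk : R.keys = (PySem.Set.ofList ((pre ++ [x]) ++ t)).filter (fun v => decide (v ∈ t)) := by
        rw [hRdef, PySem.Dict.keys_insert_of_contains rem _
          ((PySem.Dict.contains_iff_mem_keys rem x).2 hmemx), hrk, ← hpre_eq]
        apply List.filter_congr
        intro v _
        by_cases hvx : v = x
        · simp [hvx, hx]
        · simp [List.mem_cons, hvx, Ne.symm hvx]
      have hRv : ∀ v, R.getD v 0 = (t.count v : Int) := by
        intro v
        rw [hRdef, PySem.Dict.getD_insert]
        by_cases hvx : v = x
        · simp [hvx, hcx]
        · have hcnt : List.count v (x :: t) = List.count v t := by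
            simp [List.count_cons, Ne.symm hvx]
          rw [if_neg hvx, hrv v, hcnt]
      have hsums := pvStepSums x t pre sums R hRk hRv hsn hcov'
      rw [hstep, hA, pvInnerEq, hsums]
      apply ih (pre ++ [x]) R _ hRk hRv (pvNodupApplyIncs _ _ hsn)
      intro v w hv hw hvw
      rw [pvKeysApplyIncs]
      rw [PySem.Set.mem_update]
      rcases List.mem_append.1 hv with hp | hxv
      · exact Or.inl (hcov v w hp (List.mem_cons_of_mem x hw) hvw)
      · simp only [List.mem_singleton] at hxv
        subst hxv
        right
        rw [List.map_map]
        refine List.mem_map.2 ⟨w, List.mem_filter.2 ⟨hw, by simp [hvw]⟩, rfl⟩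
    · have hceq : rem.getD x 0 - 1 = 0 := by
        rw [hcx, List.count_eq_zero.2 hx]
        rfl
      have hstep : (x :: t).foldl pvStepB (rem, sums)
          = t.foldl pvStepB (rem.erase x,
              (rem.erase x).items.foldl
                (fun s p => if p.1 ≠ x then s.insert (x + p.1) (s.getD (x + p.1) 0 + p.2) else s)
                sums) := by
        rw [List.foldl_cons]
        simp only [pvStepB, hceq, ne_eq, not_true_eq_false, if_false]
      set R := rem.erase x with hRdef
      have hRk : R.keys = (PySem.Set.ofList ((pre ++ [x]) ++ t)).filter (fun v => decide (v ∈ t)) := by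
        rw [hRdef, pvKeysErase, hrk, List.filter_filter, ← hpre_eq]
        apply List.filter_congr
        intro v _
        by_cases hvx : v = x
        · simp [hvx, hx]
        · simp [List.mem_cons, hvx, Ne.symm hvx]
      have hRv : ∀ v, R.getD v 0 = (t.count v : Int) := by
        intro v
        by_cases hvx : v = x
        · rw [hvx, hRdef, pvGetDEraseSelf, List.count_eq_zero.2 hx]
          rfl
        · have hcnt : List.count v (x :: t) = List.count v t := by
            simp [List.count_cons, Ne.symm hvx]
          rw [hRdef, pvGetDEraseOfNe rem x v hvx, hrv v, hcnt]
      have hsums := pvStepSums x t pre sums R hRk hRv hsn hcov'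
      rw [hstep, hA, pvInnerEq, hsums]
      apply ih (pre ++ [x]) R _ hRk hRv (pvNodupApplyIncs _ _ hsn)
      intro v w hv hw hvw
      rw [pvKeysApplyIncs]
      rw [PySem.Set.mem_update]
      rcases List.mem_append.1 hv with hp | hxv
      · exact Or.inl (hcov v w hp (List.mem_cons_of_mem x hw) hvw)
      · simp only [List.mem_singleton] at hxv
        subst hxv
        right
        rw [List.map_map]
        refine List.mem_map.2 ⟨w, List.mem_filter.2 ⟨hw, by simp [hvw]⟩, rfl⟩

-- ===== VERDICT (by name: the statement is the Claim_ definition above) =====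
theorem create_possible_sums_spec : Claim_equal_create_possible_sums := by
  intro data _
  unfold Spec_create_possible_sums create_possible_sums create_possible_sums_alt
  show _ = (data.foldl pvStepB
      (data.foldl (fun d y => d.insert y (d.getD y 0 + 1)) PySem.Dict.empty,
        PySem.Dict.empty)).2.items
  rw [PySem.Dict.foldl_insert_getD_add_one_eq_counter]
  have hrk : (PySem.Dict.counter data).keys
      = (PySem.Set.ofList (([] : List Int) ++ data)).filter (fun v => decide (v ∈ data)) := by
    rw [PySem.Dict.keys_counter, List.nil_append]
    symm
    apply List.filter_eq_self.2
    intro v hv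
    exact decide_eq_true ((PySem.Set.mem_ofList _ _).1 hv)
  have hsn : (PySem.Dict.empty : PySem.Dict Int Int).keys.Nodup := by
    rw [PySem.Dict.keys_empty]
    exact List.nodup_nil
  have h := pvMainLoop data [] (PySem.Dict.counter data) PySem.Dict.empty hrk
    (fun v => PySem.Dict.getD_counter data v) hsn
    (fun v w hv _ _ => absurd hv (List.not_mem_nil))
  exact congrArg PySem.Dict.items h.symm
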